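-- pv_equiv track=rewrite | github.com/Rilkon/adventofcode2022 | day08/day08.py | get_view_dir
-- ===== SOURCE A (Python) =====
-- def get_view_dir(grid, x, y, direction):
--     # Helper function to get a one dimensional array from a tree at x,y in the grid representing
--     # the field of view in the top/left/up/down direction
--     match direction:
--         case "up":
--             return [grid[i][y] for i in range(x - 1, -1, -1)]
--         case "down":
--             return [grid[i][y] for i in range(x + 1, len(grid))]
--         case "left":
--             return [grid[x][i] for i in range(y - 1, -1, -1)]
--         case "right":
--             return [grid[x][i] for i in range(y + 1, len(grid[x]))]
--         case _:
--             raise ValueError(f"{direction} is not a valid direction")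
-- ===== SOURCE B (Python) =====
-- def get_view_dir(grid, x, y, direction):
--     # Single parametrized walk: step vector per direction instead of four comprehensions.
--     steps = {"up": (-1, 0), "down": (1, 0), "left": (0, -1), "right": (0, 1)}
--     if direction not in steps:
--         raise ValueError(f"{direction} is not a valid direction")
--     dx, dy = steps[direction]
--     i, j = x + dx, y + dy
--     view = []
--     while 0 <= i < len(grid) and 0 <= j < len(grid[i]):
--         view.append(grid[i][j])
--         i += dx
--         j += dy
--     return view
-- ===== Notes on version B (the rewrite author's own statement) =====
-- stated objective: alternative
-- what changed: Replaces the four per-direction list comprehensions by a single bounded walk: a direction-to-step-vector dict and one while-loop that advances (i,j) by (dx,dy) while inside the grid.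
-- outside the precondition, e.g. on get_view_dir([[1, 2], [3, 4]], 1, -1, 'up'): A returns [2], B returns []; on get_view_dir([[1, 2], [3, 4]], -2, 0, 'down'): A returns [3, 1, 3], B returns []
import Mathlib
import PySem

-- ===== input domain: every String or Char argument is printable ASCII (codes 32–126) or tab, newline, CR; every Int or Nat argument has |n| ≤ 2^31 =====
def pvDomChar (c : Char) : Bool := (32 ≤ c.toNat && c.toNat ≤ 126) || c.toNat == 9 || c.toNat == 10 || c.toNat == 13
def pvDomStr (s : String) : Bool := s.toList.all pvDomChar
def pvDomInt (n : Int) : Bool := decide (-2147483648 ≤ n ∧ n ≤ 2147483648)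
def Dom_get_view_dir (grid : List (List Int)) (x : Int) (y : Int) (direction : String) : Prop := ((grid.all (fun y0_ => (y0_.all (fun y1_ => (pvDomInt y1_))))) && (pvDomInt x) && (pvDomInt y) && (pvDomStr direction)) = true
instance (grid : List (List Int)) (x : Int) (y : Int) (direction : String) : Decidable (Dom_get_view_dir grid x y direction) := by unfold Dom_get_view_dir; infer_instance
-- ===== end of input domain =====

-- B replaces A's four per-direction comprehensions by one step-vector walk; equivalence is
-- proved on in-bounds coordinates (see Pre_ below); same cost, different decomposition.

-- ===== PORT A =====
-- A: four list comprehensions over ranges, one per direction; unknown direction raises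
-- ValueError (excluded by Pre_); out-of-range element access raises IndexError (excluded
-- by Pre_), so pyGetD's default is never read inside Pre_.
def get_view_dir (grid : List (List Int)) (x : Int) (y : Int) (direction : String) : List Int :=
  if direction == "up" then
    (PySem.List.pyRange (x - 1) (-1) (-1)).map (fun i => PySem.List.pyGetD (PySem.List.pyGetD grid i []) y 0)
  else if direction == "down" then
    (PySem.List.pyRange (x + 1) (grid.length : Int) 1).map (fun i => PySem.List.pyGetD (PySem.List.pyGetD grid i []) y 0)
  else if direction == "left" then
    (PySem.List.pyRange (y - 1) (-1) (-1)).map (fun i => PySem.List.pyGetD (PySem.List.pyGetD grid x []) i 0)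
  else if direction == "right" then
    (PySem.List.pyRange (y + 1) ((PySem.List.pyGetD grid x []).length : Int) 1).map (fun i => PySem.List.pyGetD (PySem.List.pyGetD grid x []) i 0)
  else []  -- raise ValueError (excluded by Pre_)

-- ===== PORT B =====
-- the while-loop of Source B: fuel bounds the recursion; one walk step moves one unit along
-- exactly one axis inside the grid, so grid.length + (sum of row lengths) + 1 steps always suffice.
def pvWalk (grid : List (List Int)) (dx dy : Int) (i j : Int) (fuel : Nat) : List Int :=
  match fuel with
  | 0 => []
  | fuel + 1 =>
    if 0 ≤ i ∧ i < (grid.length : Int) ∧ 0 ≤ j ∧ j < ((PySem.List.pyGetD grid i []).length : Int) then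
      PySem.List.pyGetD (PySem.List.pyGetD grid i []) j 0 :: pvWalk grid dx dy (i + dx) (j + dy) fuel
    else []

def pvSteps : PySem.Dict String (Int × Int) :=
  PySem.Dict.ofList [("up", (-1, 0)), ("down", (1, 0)), ("left", (0, -1)), ("right", (0, 1))]

def get_view_dir_alt (grid : List (List Int)) (x : Int) (y : Int) (direction : String) : List Int :=
  match pvSteps.get? direction with
  | none => []  -- raise ValueError (excluded by Pre_)
  | some (dx, dy) => pvWalk grid dx dy (x + dx) (y + dy) (grid.length + (grid.map List.length).sum + 1)

-- ===== PRECONDITION & SPEC =====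
-- Pre_ excludes inputs where A raises (unknown direction: ValueError; an out-of-range access:
-- IndexError) and the inputs with a negative or wrapping coordinate on which A still returns a
-- value read through Python's negative-index wraparound — an artefact of Python indexing no
-- grid caller uses; B's bounded walk returns the truncated (empty) view there.
def Pre_get_view_dir (grid : List (List Int)) (x : Int) (y : Int) (direction : String) : Prop :=
  (direction = "up" ∧ (x ≤ 0 ∨ (0 ≤ y ∧ x ≤ (grid.length : Int) ∧ ∀ r ∈ grid.take x.toNat, y < (r.length : Int)))) ∨
  (direction = "down" ∧ ((grid.length : Int) - 1 ≤ x ∨ (-1 ≤ x ∧ 0 ≤ y ∧ ∀ r ∈ grid.drop (x + 1).toNat, y < (r.length : Int)))) ∨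
  (direction = "left" ∧ (y ≤ 0 ∨ (0 ≤ x ∧ x < (grid.length : Int) ∧ 0 ≤ y ∧ y ≤ ((grid.getD x.toNat []).length : Int)))) ∨
  (direction = "right" ∧ 0 ≤ x ∧ x < (grid.length : Int) ∧ -1 ≤ y)
instance (grid : List (List Int)) (x : Int) (y : Int) (direction : String) : Decidable (Pre_get_view_dir grid x y direction) := by unfold Pre_get_view_dir; infer_instance

def pvWitness_get_view_dir : List (List Int) × Int × Int × String := ([[1, 2], [3, 4]], 1, 1, "right")

def Spec_get_view_dir (grid : List (List Int)) (x : Int) (y : Int) (direction : String) (out : List Int) : Prop := out = get_view_dir_alt grid x y direction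
instance (grid : List (List Int)) (x : Int) (y : Int) (direction : String) (out : List Int) : Decidable (Spec_get_view_dir grid x y direction out) := by unfold Spec_get_view_dir; infer_instance

-- ===== CLAIM (what is proved, stated in full; the proofs are below) =====
def Claim_equal_get_view_dir : Prop := ∀ (grid : List (List Int)) (x : Int) (y : Int) (direction : String), Dom_get_view_dir grid x y direction → Pre_get_view_dir grid x y direction → Spec_get_view_dir grid x y direction (get_view_dir grid x y direction)

-- ===== LEMMAS AND PROOFS =====

theorem pvWalk_succ (grid : List (List Int)) (dx dy i j : Int) (fuel : Nat) :
    pvWalk grid dx dy i j (fuel + 1) =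
      if 0 ≤ i ∧ i < (grid.length : Int) ∧ 0 ≤ j ∧ j < ((PySem.List.pyGetD grid i []).length : Int) then
        PySem.List.pyGetD (PySem.List.pyGetD grid i []) j 0 :: pvWalk grid dx dy (i + dx) (j + dy) fuel
      else [] := rfl

theorem pvWalk_up (grid : List (List Int)) (y : Int) (hy : 0 ≤ y) :
    ∀ (k fuel : Nat), k ≤ grid.length → k ≤ fuel →
    (∀ i : Nat, i < k → y < ((grid.getD i []).length : Int)) →
    pvWalk grid (-1) 0 ((k : Int) - 1) y fuel =
      (List.range k).map (fun (j : Nat) => PySem.List.pyGetD (PySem.List.pyGetD grid ((k : Int) - 1 - (j : Int)) []) y 0) := by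
  intro k
  induction k with
  | zero =>
    intro fuel _ _ _
    cases fuel with
    | zero => simp [pvWalk]
    | succ f =>
      rw [pvWalk_succ, if_neg (by rintro ⟨h1, -⟩; omega)]
      simp
  | succ k ih =>
    intro fuel hk hfk hrows
    obtain ⟨f, rfl⟩ : ∃ f, fuel = f + 1 := ⟨fuel - 1, by omega⟩
    have hidx : ((k + 1 : Nat) : Int) - 1 = (k : Int) := by push_cast; ring
    rw [hidx, pvWalk_succ, if_pos ?_]
    · rw [List.range_succ_eq_map, List.map_cons, List.map_map]
      have ht : (k : Int) + -1 = (k : Int) - 1 := by ring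
      have hy0 : y + 0 = y := by ring
      rw [ht, hy0, ih f (by omega) (by omega) (fun i hi => hrows i (by omega))]
      congr 1
      · norm_num
        intro a ha
        congr 2
        ring
    · refine ⟨by omega, by exact_mod_cast hk, hy, ?_⟩
      rw [PySem.List.pyGetD_natCast]
      exact hrows k (Nat.lt_succ_self k)

theorem pvWalk_down (grid : List (List Int)) (y : Int) (hy : 0 ≤ y) :
    ∀ (fuel : Nat) (i0 : Int), 0 ≤ i0 → (grid.length : Int) - i0 ≤ (fuel : Int) →
    (∀ i : Nat, i0 ≤ (i : Int) → i < grid.length → y < ((grid.getD i []).length : Int)) →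
    pvWalk grid 1 0 i0 y fuel =
      (PySem.List.pyRange i0 (grid.length : Int) 1).map (fun i => PySem.List.pyGetD (PySem.List.pyGetD grid i []) y 0) := by
  intro fuel
  induction fuel with
  | zero =>
    intro i0 h0 hfuel hrows
    rw [PySem.List.pyRange_one_eq_nil (by omega), List.map_nil]
    simp [pvWalk]
  | succ f ih =>
    intro i0 h0 hfuel hrows
    by_cases hlt : i0 < (grid.length : Int)
    · rw [pvWalk_succ, if_pos ?_, PySem.List.pyRange_one_cons hlt, List.map_cons]
      · congr 1
        rw [show y + 0 = y from by ring]
        exact ih (i0 + 1) (by omega) (by push_cast at hfuel ⊢; omega)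
          (fun i hi1 hi2 => hrows i (by omega) hi2)
      · refine ⟨h0, hlt, hy, ?_⟩
        rw [show i0 = ((i0.toNat : Nat) : Int) from (Int.toNat_of_nonneg h0).symm,
          PySem.List.pyGetD_natCast]
        exact hrows i0.toNat (by omega) (by omega)
    · rw [pvWalk_succ, if_neg (by rintro ⟨-, h2, -⟩; omega),
        PySem.List.pyRange_one_eq_nil (by omega), List.map_nil]

theorem pvWalk_left (grid : List (List Int)) (x : Int) (hx0 : 0 ≤ x) (hxn : x < (grid.length : Int)) :
    ∀ (k fuel : Nat), k ≤ (PySem.List.pyGetD grid x []).length → k ≤ fuel →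
    pvWalk grid 0 (-1) x ((k : Int) - 1) fuel =
      (List.range k).map (fun (j : Nat) => PySem.List.pyGetD (PySem.List.pyGetD grid x []) ((k : Int) - 1 - (j : Int)) 0) := by
  intro k
  induction k with
  | zero =>
    intro fuel _ _
    cases fuel with
    | zero => simp [pvWalk]
    | succ f =>
      rw [pvWalk_succ, if_neg (by rintro ⟨-, -, h3, -⟩; omega)]
      simp
  | succ k ih =>
    intro fuel hk hfk
    obtain ⟨f, rfl⟩ : ∃ f, fuel = f + 1 := ⟨fuel - 1, by omega⟩
    have hidx : ((k + 1 : Nat) : Int) - 1 = (k : Int) := by push_cast; ring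
    rw [hidx, pvWalk_succ, if_pos ?_]
    · rw [List.range_succ_eq_map, List.map_cons, List.map_map]
      have ht : (k : Int) + -1 = (k : Int) - 1 := by ring
      have hx' : x + 0 = x := by ring
      rw [ht, hx', ih f (by omega) (by omega)]
      congr 1
      · norm_num
        intro a ha
        have h2 : ∀ (i i' : Int), i = i' →
            PySem.List.pyGetD (PySem.List.pyGetD grid x []) i (0 : Int) =
              PySem.List.pyGetD (PySem.List.pyGetD grid x []) i' 0 := by
          intro i i' h; rw [h]
        apply h2
        ring
    · exact ⟨hx0, hxn, by omega, by exact_mod_cast hk⟩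

theorem pvWalk_right (grid : List (List Int)) (x : Int) (hx0 : 0 ≤ x) (hxn : x < (grid.length : Int)) :
    ∀ (fuel : Nat) (j0 : Int), 0 ≤ j0 → ((PySem.List.pyGetD grid x []).length : Int) - j0 ≤ (fuel : Int) →
    pvWalk grid 0 1 x j0 fuel =
      (PySem.List.pyRange j0 ((PySem.List.pyGetD grid x []).length : Int) 1).map (fun i => PySem.List.pyGetD (PySem.List.pyGetD grid x []) i 0) := by
  intro fuel
  induction fuel with
  | zero =>
    intro j0 h0 hfuel
    rw [PySem.List.pyRange_one_eq_nil (by omega), List.map_nil]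
    simp [pvWalk]
  | succ f ih =>
    intro j0 h0 hfuel
    by_cases hlt : j0 < ((PySem.List.pyGetD grid x []).length : Int)
    · rw [pvWalk_succ, if_pos ⟨hx0, hxn, h0, hlt⟩, PySem.List.pyRange_one_cons hlt, List.map_cons]
      congr 1
      rw [show x + 0 = x from by ring]
      exact ih (j0 + 1) (by omega) (by push_cast at hfuel ⊢; omega)
    · rw [pvWalk_succ, if_neg (by rintro ⟨-, -, -, h4⟩; omega),
        PySem.List.pyRange_one_eq_nil (by omega), List.map_nil]

-- ===== VERDICT (by name: the statement is the Claim_ definition above) =====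
theorem pvRowLen_le_sum (grid : List (List Int)) (m : Nat) (hm : m < grid.length) :
    (grid.getD m []).length ≤ (grid.map List.length).sum := by
  rw [List.getD_eq_getElem grid [] hm]
  exact List.single_le_sum (fun a _ => Nat.zero_le a) _
    (List.mem_map_of_mem (List.getElem_mem hm))

theorem get_view_dir_spec : Claim_equal_get_view_dir := by
  intro grid x y direction _ hpre
  unfold Spec_get_view_dir
  rcases hpre with ⟨rfl, h⟩ | ⟨rfl, h⟩ | ⟨rfl, h⟩ | ⟨rfl, hx0, hxn, hy1⟩
  · -- up
    rw [show get_view_dir grid x y "up" = (PySem.List.pyRange (x - 1) (-1) (-1)).map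
          (fun i => PySem.List.pyGetD (PySem.List.pyGetD grid i []) y 0) from rfl,
        show get_view_dir_alt grid x y "up" = pvWalk grid (-1) 0 (x + -1) (y + 0)
          (grid.length + (grid.map List.length).sum + 1) from rfl]
    by_cases hx : x ≤ 0
    · rw [PySem.List.pyRange_neg_one_eq_nil (by omega), List.map_nil, pvWalk_succ,
        if_neg (by rintro ⟨h1, -⟩; omega)]
    · rcases h with hx' | ⟨hy0, hxn, hrows⟩
      · omega
      · obtain ⟨k, rfl⟩ : ∃ k : Nat, x = (k : Int) := ⟨x.toNat, by omega⟩
        simp only [Int.toNat_natCast] at hrows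
        have hkl : k ≤ grid.length := by exact_mod_cast hxn
        rw [show ((k : Int) + -1) = (k : Int) - 1 from by ring,
            show (y + 0) = y from by ring,
            pvWalk_up grid y hy0 k _ hkl (by omega) ?_]
        · rw [PySem.List.pyRange_neg_one,
              show (((k : Int) - 1) - (-1)).toNat = k from by omega, List.map_map]
          rfl
        · intro i hi
          have hil : i < grid.length := by omega
          rw [List.getD_eq_getElem grid [] hil]
          have h1 : (grid.take k)[i]'(by simp; omega) = grid[i] := by
            rw [List.getElem_take]
          exact hrows _ (h1 ▸ List.getElem_mem _)
  · -- down
    rw [show get_view_dir grid x y "down" = (PySem.List.pyRange (x + 1) (grid.length : Int) 1).map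
          (fun i => PySem.List.pyGetD (PySem.List.pyGetD grid i []) y 0) from rfl,
        show get_view_dir_alt grid x y "down" = pvWalk grid 1 0 (x + 1) (y + 0)
          (grid.length + (grid.map List.length).sum + 1) from rfl]
    rcases h with hbig | ⟨hx1, hy0, hrows⟩
    · rw [PySem.List.pyRange_one_eq_nil (by omega), List.map_nil, pvWalk_succ,
        if_neg (by rintro ⟨-, h2, -⟩; omega)]
    · rw [show (y + 0) = y from by ring,
          pvWalk_down grid y hy0 _ (x + 1) (by omega)
            (by
              have hle : (grid.length : Int) ≤ ((grid.length + (grid.map List.length).sum + 1 : Nat) : Int) :=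
                by exact_mod_cast (by omega : grid.length ≤ grid.length + (grid.map List.length).sum + 1)
              omega) ?_]
      intro i h1 h2
      have hmi : (x + 1).toNat ≤ i := by omega
      have hlen : i - (x + 1).toNat < (grid.drop (x + 1).toNat).length := by simp; omega
      have h3 : (grid.drop (x + 1).toNat)[i - (x + 1).toNat]'hlen = grid[i]'h2 := by
        rw [List.getElem_drop]; congr 1; omega
      rw [List.getD_eq_getElem grid [] h2, ← h3]
      exact hrows _ (List.getElem_mem _)
  · -- left
    rw [show get_view_dir grid x y "left" = (PySem.List.pyRange (y - 1) (-1) (-1)).map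
          (fun i => PySem.List.pyGetD (PySem.List.pyGetD grid x []) i 0) from rfl,
        show get_view_dir_alt grid x y "left" = pvWalk grid 0 (-1) (x + 0) (y + -1)
          (grid.length + (grid.map List.length).sum + 1) from rfl,
        show (x + 0) = x from by ring]
    rcases h with hyle | ⟨hx0', hxn', hy0', hylen⟩
    · rw [PySem.List.pyRange_neg_one_eq_nil (by omega), List.map_nil, pvWalk_succ,
        if_neg (by rintro ⟨-, -, h3, -⟩; omega)]
    · obtain ⟨k, rfl⟩ : ∃ k : Nat, y = (k : Int) := ⟨y.toNat, by omega⟩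
      have hr : PySem.List.pyGetD grid x [] = grid.getD x.toNat [] := by
        conv_lhs => rw [show x = ((x.toNat : Nat) : Int) from by omega]
        rw [PySem.List.pyGetD_natCast]
      have hxl : x.toNat < grid.length := by omega
      have hsum : (grid.getD x.toNat []).length ≤ (grid.map List.length).sum :=
        pvRowLen_le_sum grid x.toNat hxl
      have hk : k ≤ (PySem.List.pyGetD grid x []).length := by
        rw [hr]; exact_mod_cast hylen
      rw [show ((k : Int) + -1) = (k : Int) - 1 from by ring,
          pvWalk_left grid x hx0' hxn' k _ hk (by rw [hr] at hk; omega)]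
      rw [PySem.List.pyRange_neg_one,
          show (((k : Int) - 1) - (-1)).toNat = k from by omega, List.map_map]
      rfl
  · -- right
    rw [show get_view_dir grid x y "right" = (PySem.List.pyRange (y + 1)
          ((PySem.List.pyGetD grid x []).length : Int) 1).map
          (fun i => PySem.List.pyGetD (PySem.List.pyGetD grid x []) i 0) from rfl,
        show get_view_dir_alt grid x y "right" = pvWalk grid 0 1 (x + 0) (y + 1)
          (grid.length + (grid.map List.length).sum + 1) from rfl,
        show (x + 0) = x from by ring]
    have hr : PySem.List.pyGetD grid x [] = grid.getD x.toNat [] := by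
      conv_lhs => rw [show x = ((x.toNat : Nat) : Int) from by omega]
      rw [PySem.List.pyGetD_natCast]
    have hxl : x.toNat < grid.length := by omega
    have hsum : (grid.getD x.toNat []).length ≤ (grid.map List.length).sum :=
      pvRowLen_le_sum grid x.toNat hxl
    rw [pvWalk_right grid x hx0 hxn _ (y + 1) (by omega) (by
      rw [hr]
      have hle : ((grid.getD x.toNat []).length : Int) ≤
          ((grid.length + (grid.map List.length).sum + 1 : Nat) : Int) := by
        exact_mod_cast (by omega : (grid.getD x.toNat []).length ≤
          grid.length + (grid.map List.length).sum + 1)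
      omega)]
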